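-- pv_equiv track=rewrite | github.com/ArtZussMan/Euler-Project-some-solutions | 26_reciprocal_cycles.py | find_repeating_decimal
-- ===== SOURCE A (Python) =====
-- def find_repeating_decimal(numerator, denominator):
--     # Handle the case when there's no repeating decimal (terminating decimal)
--     remainder = numerator % denominator
--     seen_remainders = {}
--     decimal_places = []
--
--     while remainder != 0:
--         if remainder in seen_remainders:
--             start_index = seen_remainders[remainder]
--             repeating_cycle = decimal_places[start_index:]
--             non_repeating = decimal_places[:start_index]
--             return f"0.{''.join(map(str, non_repeating))}({''.join(map(str, repeating_cycle))})"
--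
--         seen_remainders[remainder] = len(decimal_places)
--         remainder *= 10
--         decimal_places.append(remainder // denominator)
--         remainder %= denominator
--
--     # If no repeating decimal, return the terminating decimal part
--     return f"0.{''.join(map(str, decimal_places))}"
-- ===== SOURCE B (Python) =====
-- def find_repeating_decimal(numerator, denominator):
--     r0 = numerator % denominator
--     if r0 == 0:
--         return "0."
--     rr, dd = abs(r0), abs(denominator)
--     # reduce the fraction, then factor the reduced denominator as 2^a * 5^b * m
--     x, y = rr, dd
--     while y:
--         x, y = y, x % y
--     t = dd // x
--     a = 0
--     while t % 2 == 0:
--         t //= 2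
--         a += 1
--     b = 0
--     while t % 5 == 0:
--         t //= 5
--         b += 1
--     s = a if a >= b else b          # length of the non-repeating prefix
--     if t == 1:
--         count = s                   # terminating: exactly s digits
--     else:
--         u = 10 % t                  # p = multiplicative order of 10 mod t
--         p = 1
--         while u != 1:
--             u = u * 10 % t
--             p += 1
--         count = s + p
--     digits = []
--     r = rr
--     for _ in range(count):
--         r *= 10
--         digits.append(r // dd)
--         r %= dd
--     head = ''.join(map(str, digits[:s]))
--     if t == 1:
--         return "0." + head
--     return "0." + head + "(" + ''.join(map(str, digits[s:])) + ")"
-- ===== Notes on version B (the rewrite author's own statement) =====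
-- stated objective: alternative
-- what changed: A finds the cycle by memoising every remainder in a dict until one repeats; B instead reduces the fraction, factors 2s and 5s out of the denominator to get the non-repeating prefix length, computes the period as the multiplicative order of 10 modulo the remaining factor, and then emits exactly prefix+period digits with a plain division loop (no remainder-to-position dict).
import Mathlib
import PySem

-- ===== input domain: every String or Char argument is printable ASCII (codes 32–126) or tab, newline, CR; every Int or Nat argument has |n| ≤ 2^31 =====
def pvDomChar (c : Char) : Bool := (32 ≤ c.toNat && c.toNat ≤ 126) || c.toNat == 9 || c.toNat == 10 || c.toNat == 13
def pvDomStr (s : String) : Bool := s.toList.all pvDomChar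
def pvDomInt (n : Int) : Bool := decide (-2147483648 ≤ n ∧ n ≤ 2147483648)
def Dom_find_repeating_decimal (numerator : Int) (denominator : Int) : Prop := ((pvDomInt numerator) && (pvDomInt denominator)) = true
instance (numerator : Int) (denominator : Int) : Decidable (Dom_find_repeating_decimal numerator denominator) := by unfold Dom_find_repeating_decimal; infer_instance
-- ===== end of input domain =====

-- B replaces A's remainder-memoising dict with arithmetic (reduce the fraction, factor 2s and 5s
-- out of the denominator for the non-repeating prefix length, period = multiplicative order of 10
-- modulo the rest) and one division loop emitting exactly prefix+period digits; objective:
-- alternative (similar cost, no dict).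

-- ===== PORT A =====
-- ''.join(map(str, ds))
def pvDigitsStr (ds : List Int) : String := PySem.Str.join "" (ds.map PySem.Int.toStr)

-- A's while-loop; fuel |denominator|+1 is provably enough (at most |denominator| distinct
-- remainders can be stored before the loop must return); the 0-fuel branch is unreachable under Pre_.
def pvALoop (den : Int) : Nat → Int → PySem.Dict Int Int → List Int → String
  | 0, _, _, _ => ""
  | fuel+1, r, seen, digits =>
    if r = 0 then "0." ++ pvDigitsStr digits
    else if seen.contains r then
      let start := (seen.get? r).getD 0
      "0." ++ pvDigitsStr (PySem.List.slice digits none (some start)) ++ "(" ++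
        pvDigitsStr (PySem.List.slice digits (some start) none) ++ ")"
    else
      let seen' := seen.insert r (digits.length : Int)
      let r' := r * 10
      pvALoop den fuel (PySem.Int.mod r' den) seen' (digits ++ [PySem.Int.floordiv r' den])

def find_repeating_decimal (numerator : Int) (denominator : Int) : String :=
  pvALoop denominator (denominator.natAbs + 1) (PySem.Int.mod numerator denominator)
    PySem.Dict.empty []

-- ===== PORT B =====
-- Source B's Euclid loop `while y: x, y = y, x % y`
def pvGcd (x y : Nat) : Nat :=
  if h : y = 0 then x else pvGcd y (x % y)
termination_by y
decreasing_by exact Nat.mod_lt x (Nat.pos_of_ne_zero h)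

-- Source B's `while t % P == 0: t //= P; a += 1` (fuel t is provably enough for 0 < t)
def pvStrip (P : Nat) : Nat → Nat → Nat → Nat × Nat
  | 0, t, acc => (acc, t)
  | fuel+1, t, acc => if t % P = 0 then pvStrip P fuel (t / P) (acc + 1) else (acc, t)

-- Source B's `while u != 1: u = u * 10 % m; p += 1` (fuel m is provably enough: order ≤ φ(m) < m)
def pvOrder (m : Nat) : Nat → Nat → Nat → Nat
  | 0, _, p => p
  | fuel+1, u, p => if u = 1 then p else pvOrder m fuel (u * 10 % m) (p + 1)

def pvDigitsStrN (ds : List Nat) : String :=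
  PySem.Str.join "" (ds.map (fun n : Nat => PySem.Int.toStr (n : Int)))

def find_repeating_decimal_alt (numerator : Int) (denominator : Int) : String :=
  let r0 := PySem.Int.mod numerator denominator
  if r0 = 0 then "0."
  else
    let rr := r0.natAbs
    let dd := denominator.natAbs
    let g := pvGcd rr dd
    let t0 := dd / g
    let st2 := pvStrip 2 t0 t0 0
    let st5 := pvStrip 5 st2.2 st2.2 0
    let m := st5.2
    let s := if st5.1 ≤ st2.1 then st2.1 else st5.1
    let count := if m = 1 then s else s + pvOrder m m (10 % m) 1
    let digits := ((List.range count).foldl (fun (st : List Nat × Nat) _ =>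
        (st.1 ++ [st.2 * 10 / dd], st.2 * 10 % dd)) ([], rr)).1
    let head := pvDigitsStrN (digits.take s)
    if m = 1 then "0." ++ head
    else "0." ++ head ++ "(" ++ pvDigitsStrN (digits.drop s) ++ ")"

-- ===== PRECONDITION & SPEC =====
-- Pre_ excludes exactly denominator = 0, where Python A raises ZeroDivisionError.
def Pre_find_repeating_decimal (numerator : Int) (denominator : Int) : Prop := denominator ≠ 0
instance (numerator : Int) (denominator : Int) : Decidable (Pre_find_repeating_decimal numerator denominator) := by
  unfold Pre_find_repeating_decimal; infer_instance

def pvWitness_find_repeating_decimal : Int × Int := (1, 7)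

def Spec_find_repeating_decimal (numerator : Int) (denominator : Int) (out : String) : Prop :=
  out = find_repeating_decimal_alt numerator denominator
instance (numerator : Int) (denominator : Int) (out : String) : Decidable (Spec_find_repeating_decimal numerator denominator out) := by
  unfold Spec_find_repeating_decimal; infer_instance

-- ===== CLAIM (what is proved, stated in full; the proofs are below) =====
def Claim_equal_find_repeating_decimal : Prop := ∀ (numerator : Int) (denominator : Int), Dom_find_repeating_decimal numerator denominator → Pre_find_repeating_decimal numerator denominator → Spec_find_repeating_decimal numerator denominator (find_repeating_decimal numerator denominator)

-- ===== LEMMAS AND PROOFS =====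

-- remainder and digit sequences of the long division of rr by dd, and A's loop state at step k
def pvR (rr dd k : Nat) : Nat := rr * 10 ^ k % dd
def pvDg (rr dd k : Nat) : Nat := pvR rr dd k * 10 / dd
def pvSeen (rr dd k : Nat) : PySem.Dict Int Int :=
  PySem.Dict.mk ((List.range k).map fun i => ((pvR rr dd i : Int), (i : Int)))
def pvDigs (rr dd k : Nat) : List Int := (List.range k).map fun i => ((pvDg rr dd i : Int))

lemma pvR_succ (rr dd k : Nat) : pvR rr dd (k+1) = pvR rr dd k * 10 % dd := by
  simp [pvR, pow_succ, Nat.mod_mul_mod, ← Nat.mul_assoc]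

lemma pvR_zero (rr dd : Nat) (h : rr < dd) : pvR rr dd 0 = rr := by
  simp [pvR, Nat.mod_eq_of_lt h]

lemma pvDigitsStr_cast (l : List Nat) :
    pvDigitsStr (l.map (fun n : Nat => (n : Int))) = pvDigitsStrN l := by
  simp [pvDigitsStr, pvDigitsStrN, List.map_map, Function.comp_def]

lemma pv_mulR (g r' d' k : Nat) : pvR (g * r') (g * d') k = g * pvR r' d' k := by
  simp [pvR, Nat.mul_assoc, Nat.mul_mod_mul_left]

lemma pvDigs_eq (rr dd K : Nat) :
    pvDigs rr dd K = ((List.range K).map (pvDg rr dd)).map (fun n : Nat => (n : Int)) := by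
  rw [List.map_map]; rfl

lemma pvDigitsStr_take (rr dd K t : Nat) :
    pvDigitsStr ((pvDigs rr dd K).take t)
      = pvDigitsStrN (((List.range K).map (pvDg rr dd)).take t) := by
  rw [pvDigs_eq, ← List.map_take, pvDigitsStr_cast]

lemma pvDigitsStr_drop (rr dd K t : Nat) :
    pvDigitsStr ((pvDigs rr dd K).drop t)
      = pvDigitsStrN (((List.range K).map (pvDg rr dd)).drop t) := by
  rw [pvDigs_eq, ← List.map_drop, pvDigitsStr_cast]

-- ---------- number theory ----------

lemma pv_coprime10 (m : Nat) (h2 : ¬ 2 ∣ m) (h5 : ¬ 5 ∣ m) : Nat.Coprime 10 m := by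
  have c2 : Nat.Coprime 2 m := (Nat.Prime.coprime_iff_not_dvd Nat.prime_two).mpr h2
  have c5 : Nat.Coprime 5 m := (Nat.Prime.coprime_iff_not_dvd (by norm_num)).mpr h5
  have : Nat.Coprime (2 * 5) m := Nat.Coprime.mul_left c2 c5
  simpa using this

lemma pv_two_pow_dvd_ten_pow (a k : Nat) : 2 ^ a ∣ 10 ^ k ↔ a ≤ k := by
  have h10 : (10:ℕ) ^ k = 2 ^ k * 5 ^ k := by rw [← Nat.mul_pow]
  rw [h10]
  constructor
  · intro h
    have hco : Nat.Coprime (2 ^ a) (5 ^ k) := Nat.Coprime.pow (H1 := by norm_num) _ _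
    have := hco.dvd_of_dvd_mul_right h
    exact (Nat.pow_dvd_pow_iff_le_right (by norm_num)).mp this
  · intro h
    exact Dvd.dvd.mul_right (Nat.pow_dvd_pow 2 h) _

lemma pv_five_pow_dvd_ten_pow (b k : Nat) : 5 ^ b ∣ 10 ^ k ↔ b ≤ k := by
  have h10 : (10:ℕ) ^ k = 2 ^ k * 5 ^ k := by rw [← Nat.mul_pow]
  rw [h10]
  constructor
  · intro h
    have hco : Nat.Coprime (5 ^ b) (2 ^ k) := Nat.Coprime.pow (H1 := by norm_num) _ _
    have := hco.dvd_of_dvd_mul_left h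
    exact (Nat.pow_dvd_pow_iff_le_right (by norm_num)).mp this
  · intro h
    exact Dvd.dvd.mul_left (Nat.pow_dvd_pow 5 h) _

lemma pv_not_dvd_pred (q t : Nat) (hq : q ∣ 10) (hq1 : 1 < q) (ht : 1 ≤ t) : ¬ q ∣ 10 ^ t - 1 := by
  intro h
  have h10 : q ∣ 10 ^ t := hq.trans (dvd_pow_self 10 (by omega))
  have h1 : q ∣ 10 ^ t - (10 ^ t - 1) := Nat.dvd_sub h10 h
  have hpos : 1 ≤ 10 ^ t := Nat.one_le_pow _ _ (by norm_num)
  have h2 : 10 ^ t - (10 ^ t - 1) = 1 := by omega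
  rw [h2] at h1
  exact absurd (Nat.le_of_dvd one_pos h1) (by omega)

lemma pv_dvd_ten_pow (a b m k : Nat) (h2 : ¬ 2 ∣ m) (h5 : ¬ 5 ∣ m) :
    2 ^ a * 5 ^ b * m ∣ 10 ^ k ↔ (m = 1 ∧ max a b ≤ k) := by
  constructor
  · intro h
    have hm : m ∣ 10 ^ k := (dvd_mul_left m _).trans h
    have hco : Nat.Coprime m (10 ^ k) := Nat.Coprime.pow_right _ ((pv_coprime10 m h2 h5).symm)
    have hm1 : m = 1 := Nat.eq_one_of_dvd_coprimes hco (dvd_refl m) hm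
    have ha : 2 ^ a ∣ 10 ^ k := ((dvd_mul_right (2 ^ a) (5 ^ b)).trans (dvd_mul_right _ m)).trans h
    have hb : 5 ^ b ∣ 10 ^ k := ((dvd_mul_left (5 ^ b) (2 ^ a)).trans (dvd_mul_right _ m)).trans h
    exact ⟨hm1, max_le ((pv_two_pow_dvd_ten_pow a k).mp ha) ((pv_five_pow_dvd_ten_pow b k).mp hb)⟩
  · rintro ⟨hm1, hk⟩
    subst hm1
    have ha : 2 ^ a ∣ 10 ^ k := (pv_two_pow_dvd_ten_pow a k).mpr (le_trans (le_max_left a b) hk)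
    have hb : 5 ^ b ∣ 10 ^ k := (pv_five_pow_dvd_ten_pow b k).mpr (le_trans (le_max_right a b) hk)
    have hco : Nat.Coprime (2 ^ a) (5 ^ b) := Nat.Coprime.pow (H1 := by norm_num) _ _
    simpa using Nat.Coprime.mul_dvd_of_dvd_of_dvd hco ha hb

lemma pv_dvd_split (a b m i t : Nat) (h2 : ¬ 2 ∣ m) (h5 : ¬ 5 ∣ m) (ht : 1 ≤ t) :
    2 ^ a * 5 ^ b * m ∣ 10 ^ i * (10 ^ t - 1) ↔ (max a b ≤ i ∧ m ∣ 10 ^ t - 1) := by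
  have c2 : Nat.Coprime 2 (10 ^ t - 1) :=
    (Nat.Prime.coprime_iff_not_dvd Nat.prime_two).mpr (pv_not_dvd_pred 2 t (by norm_num) (by norm_num) ht)
  have c5 : Nat.Coprime 5 (10 ^ t - 1) :=
    (Nat.Prime.coprime_iff_not_dvd (by norm_num)).mpr (pv_not_dvd_pred 5 t (by norm_num) (by norm_num) ht)
  have cm10 : Nat.Coprime m (10 ^ i) := Nat.Coprime.pow_right _ ((pv_coprime10 m h2 h5).symm)
  constructor
  · intro h
    have ha : 2 ^ a ∣ 10 ^ i * (10 ^ t - 1) := ((dvd_mul_right (2 ^ a) (5 ^ b)).trans (dvd_mul_right _ m)).trans h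
    have hb : 5 ^ b ∣ 10 ^ i * (10 ^ t - 1) := ((dvd_mul_left (5 ^ b) (2 ^ a)).trans (dvd_mul_right _ m)).trans h
    have hm : m ∣ 10 ^ i * (10 ^ t - 1) := (dvd_mul_left m _).trans h
    have ha' : 2 ^ a ∣ 10 ^ i := (Nat.Coprime.pow (H1 := c2) _ 1).dvd_of_dvd_mul_right (by simpa using ha)
    have hb' : 5 ^ b ∣ 10 ^ i := (Nat.Coprime.pow (H1 := c5) _ 1).dvd_of_dvd_mul_right (by simpa using hb)
    have hm' : m ∣ 10 ^ t - 1 := cm10.dvd_of_dvd_mul_left hm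
    exact ⟨max_le ((pv_two_pow_dvd_ten_pow a i).mp ha') ((pv_five_pow_dvd_ten_pow b i).mp hb'), hm'⟩
  · rintro ⟨hi, hm⟩
    have ha : 2 ^ a ∣ 10 ^ i := (pv_two_pow_dvd_ten_pow a i).mpr (le_trans (le_max_left a b) hi)
    have hb : 5 ^ b ∣ 10 ^ i := (pv_five_pow_dvd_ten_pow b i).mpr (le_trans (le_max_right a b) hi)
    have hco : Nat.Coprime (2 ^ a) (5 ^ b) := Nat.Coprime.pow (H1 := by norm_num) _ _
    have hab : 2 ^ a * 5 ^ b ∣ 10 ^ i := Nat.Coprime.mul_dvd_of_dvd_of_dvd hco ha hb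
    exact mul_dvd_mul hab hm

lemma pvR_eq_iff_dvd (r' d' : Nat) (hco : Nat.Coprime r' d') (i j : Nat) (hij : i ≤ j) :
    (pvR r' d' i = pvR r' d' j) ↔ d' ∣ 10 ^ i * (10 ^ (j - i) - 1) := by
  simp only [pvR]
  have hle : r' * 10 ^ i ≤ r' * 10 ^ j := Nat.mul_le_mul_left _ (Nat.pow_le_pow_right (by norm_num) hij)
  have hsub : r' * 10 ^ j - r' * 10 ^ i = r' * (10 ^ i * (10 ^ (j - i) - 1)) := by
    have hj : (10:ℕ) ^ j = 10 ^ i * 10 ^ (j - i) := by rw [← pow_add]; congr 1; omega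
    rw [hj, Nat.mul_sub, Nat.mul_sub]; ring_nf
  constructor
  · intro h
    have := (Nat.modEq_iff_dvd' hle).mp h
    rw [hsub] at this
    exact (Nat.Coprime.dvd_of_dvd_mul_left (hco.symm) this)
  · intro h
    exact (Nat.modEq_iff_dvd' hle).mpr (by rw [hsub]; exact h.mul_left r')

lemma pv_order_dvd (m p : Nat) (hm : 1 < m) (hp : 0 < p) (hpe : 10 ^ p % m = 1)
    (hmin : ∀ q, 0 < q → q < p → 10 ^ q % m ≠ 1) (t : Nat) :
    m ∣ 10 ^ t - 1 ↔ p ∣ t := by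
  have key : ∀ x y : Nat, 10 ^ x % m = 1 → 10 ^ (x + y) % m = 10 ^ y % m := by
    intro x y hx
    rw [pow_add, ← Nat.mod_mul_mod, hx, Nat.one_mul]
  have hmul : ∀ q : Nat, 10 ^ (q * p) % m = 1 % m := by
    intro q
    induction q with
    | zero => simp
    | succ n ih =>
      have : (n + 1) * p = p + n * p := by ring
      rw [this, key p (n * p) hpe, ih]
  have hiff : ∀ u, (m ∣ 10 ^ u - 1 ↔ 10 ^ u % m = 1) := by
    intro u
    have hpos : 1 ≤ 10 ^ u := Nat.one_le_pow _ _ (by norm_num)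
    constructor
    · intro h
      have := (Nat.modEq_iff_dvd' hpos).mpr h
      have h2 : 10 ^ u % m = 1 % m := (Nat.ModEq.symm this)
      rwa [Nat.mod_eq_of_lt hm] at h2
    · intro h
      exact (Nat.modEq_iff_dvd' hpos).mp (by unfold Nat.ModEq; rw [h, Nat.mod_eq_of_lt hm])
  rw [hiff t]
  constructor
  · intro h
    rcases Nat.lt_or_ge (t % p) 1 with h0 | h1
    · exact Nat.dvd_of_mod_eq_zero (by omega)
    · exfalso
      have h2 : 10 ^ ((t / p) * p + t % p) % m = 10 ^ (t % p) % m :=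
        key _ _ (by rw [hmul, Nat.mod_eq_of_lt hm])
      have h3 : (t / p) * p + t % p = t := by rw [Nat.mul_comm]; exact Nat.div_add_mod t p
      rw [← h3, h2] at h
      exact hmin (t % p) (by omega) (Nat.mod_lt _ hp) h
  · rintro ⟨q, rfl⟩
    have : p * q = q * p := by ring
    rw [this, hmul, Nat.mod_eq_of_lt hm]

-- ---------- A's loop, characterised ----------

lemma pvSeen_contains (rr dd k : Nat) (x : Int) :
    (pvSeen rr dd k).contains x = true ↔ ∃ i, i < k ∧ ((pvR rr dd i : Nat) : Int) = x := by
  rw [PySem.Dict.contains_iff_mem_keys]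
  simp [pvSeen, PySem.Dict.keys_mk, List.mem_range]

lemma pvALoop_step (rr dd k fuel : Nat) (hnz : pvR rr dd k ≠ 0)
    (hfresh : ∀ i, i < k → pvR rr dd i ≠ pvR rr dd k) :
    pvALoop (dd : Int) (fuel+1) ((pvR rr dd k : Nat) : Int) (pvSeen rr dd k) (pvDigs rr dd k)
      = pvALoop (dd : Int) fuel ((pvR rr dd (k+1) : Nat) : Int) (pvSeen rr dd (k+1)) (pvDigs rr dd (k+1)) := by
  have hcast : ((pvR rr dd k : Nat) : Int) ≠ 0 := Int.natCast_ne_zero.mpr hnz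
  have hcon : (pvSeen rr dd k).contains ((pvR rr dd k : Nat) : Int) = false := by
    rw [Bool.eq_false_iff]
    intro h
    rcases (pvSeen_contains rr dd k _).mp h with ⟨i, hi, he⟩
    exact hfresh i hi (by exact_mod_cast he)
  have hlen : (pvDigs rr dd k).length = k := by simp [pvDigs]
  rw [pvALoop, if_neg hcast, hcon]
  simp only [Bool.false_eq_true, if_false]
  have hmul : ((pvR rr dd k : Nat) : Int) * 10 = ((pvR rr dd k * 10 : Nat) : Int) := by push_cast; ring
  have hmod : PySem.Int.mod (((pvR rr dd k : Nat) : Int) * 10) (dd : Int)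
      = ((pvR rr dd (k+1) : Nat) : Int) := by
    rw [hmul, PySem.Int.mod_natCast, ← pvR_succ]
  have hdiv : PySem.Int.floordiv (((pvR rr dd k : Nat) : Int) * 10) (dd : Int)
      = ((pvDg rr dd k : Nat) : Int) := by
    rw [hmul, PySem.Int.floordiv_natCast]; rfl
  rw [hmod, hdiv, hlen]
  congr 1
  · apply PySem.Dict.ext
    rw [PySem.Dict.items_insert_of_not_contains _ _ hcon]
    simp [pvSeen, List.range_succ]
  · simp [pvDigs, List.range_succ]

lemma pvALoop_term (rr dd s : Nat)
    (hzero : ∀ k, pvR rr dd k = 0 ↔ s ≤ k)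
    (hfresh : ∀ i j, i < j → j ≤ s → pvR rr dd i ≠ pvR rr dd j) :
    ∀ fuel k, k ≤ s → s - k < fuel →
    pvALoop (dd : Int) fuel ((pvR rr dd k : Nat) : Int) (pvSeen rr dd k) (pvDigs rr dd k)
      = "0." ++ pvDigitsStr (pvDigs rr dd s) := by
  intro fuel
  induction fuel with
  | zero => intro k hk hf; omega
  | succ f ih =>
    intro k hk hf
    rcases eq_or_lt_of_le hk with rfl | hlt
    · have h0 : pvR rr dd k = 0 := (hzero k).mpr le_rfl
      rw [pvALoop, if_pos (by exact_mod_cast congrArg (Nat.cast : Nat → Int) h0)]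
    · rw [pvALoop_step rr dd k f (fun h => by have := (hzero k).mp h; omega)
        (fun i hi => hfresh i k hi hk)]
      exact ih (k+1) hlt (by omega)

lemma pvALoop_rep (rr dd s p : Nat) (hp : 0 < p)
    (hnz : ∀ k, pvR rr dd k ≠ 0)
    (heq : ∀ i j, i < j → j ≤ s + p → (pvR rr dd i = pvR rr dd j ↔ (s ≤ i ∧ p ∣ j - i))) :
    ∀ fuel k, k ≤ s + p → s + p - k < fuel →
    pvALoop (dd : Int) fuel ((pvR rr dd k : Nat) : Int) (pvSeen rr dd k) (pvDigs rr dd k)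
      = "0." ++ pvDigitsStr ((pvDigs rr dd (s + p)).take s) ++ "(" ++
          pvDigitsStr ((pvDigs rr dd (s + p)).drop s) ++ ")" := by
  intro fuel
  induction fuel with
  | zero => intro k hk hf; omega
  | succ f ih =>
    intro k hk hf
    rcases eq_or_lt_of_le hk with rfl | hlt
    · -- k = s + p : the repeat is detected here
      have hRs : pvR rr dd (s + p) = pvR rr dd s :=
        ((heq s (s + p) (by omega) le_rfl).mpr ⟨le_rfl, by simp⟩).symm
      have hcast : ((pvR rr dd (s + p) : Nat) : Int) ≠ 0 := Int.natCast_ne_zero.mpr (hnz _)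
      have hmem : (((pvR rr dd s : Nat) : Int), ((s : Nat) : Int)) ∈ (pvSeen rr dd (s + p)).items := by
        simp only [pvSeen]
        exact List.mem_map.mpr ⟨s, List.mem_range.mpr (by omega), rfl⟩
      have hnodup : (pvSeen rr dd (s + p)).keys.Nodup := by
        rw [pvSeen, PySem.Dict.keys_mk, List.map_map]
        apply List.Nodup.map_on _ (List.nodup_range)
        intro x hx y hy hxy
        simp only [List.mem_range] at hx hy
        have hR : pvR rr dd x = pvR rr dd y := by simpa using hxy
        by_contra hne
        rcases Nat.lt_or_ge x y with hxy' | hxy'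
        · rcases (heq x y hxy' (by omega)).mp hR with ⟨hsx, hdvd⟩
          have := Nat.le_of_dvd (by omega) hdvd
          omega
        · have hyx : y < x := by omega
          rcases (heq y x hyx (by omega)).mp hR.symm with ⟨hsy, hdvd⟩
          have := Nat.le_of_dvd (by omega) hdvd
          omega
      have hget : (pvSeen rr dd (s + p)).get? ((pvR rr dd (s + p) : Nat) : Int) = some ((s : Nat) : Int) := by
        rw [hRs]
        exact PySem.Dict.get?_of_mem_items _ hmem hnodup
      have hcon : (pvSeen rr dd (s + p)).contains ((pvR rr dd (s + p) : Nat) : Int) = true := by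
        apply (pvSeen_contains rr dd (s + p) _).mpr
        exact ⟨s, by omega, by rw [hRs]⟩
      rw [pvALoop, if_neg hcast, hcon]
      simp only [if_true, hget]
      rw [show ((some ((s : Nat) : Int)).getD 0) = ((s : Nat) : Int) from rfl]
      rw [PySem.List.slice_to_natCast, PySem.List.slice_from_natCast]
    · rw [pvALoop_step rr dd k f (hnz k)
        (fun i hi hR => by
          rcases (heq i k hi (by omega)).mp hR with ⟨hsi, hdvd⟩
          have := Nat.le_of_dvd (by omega) hdvd
          omega)]
      exact ih (k+1) hlt (by omega)

-- ---------- negative denominator mirrors the positive loop ----------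

def pvNegD (d : PySem.Dict Int Int) : PySem.Dict Int Int :=
  PySem.Dict.mk (d.items.map fun kv => (-kv.1, kv.2))

lemma pvNegD_contains (d : PySem.Dict Int Int) (r : Int) :
    (pvNegD d).contains (-r) = d.contains r := by
  rcases d with ⟨l⟩
  simp only [pvNegD, PySem.Dict.contains_mk, List.any_map]
  induction l with
  | nil => rfl
  | cons h t iht => simp only [List.any_cons, iht, Function.comp]; congr 1; simp [neg_inj]

lemma pvNegD_get?_aux : ∀ (l : List (Int × Int)) (r : Int),
    (PySem.Dict.mk (l.map fun kv => (-kv.1, kv.2))).get? (-r) = (PySem.Dict.mk l).get? r := by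
  intro l
  induction l with
  | nil => intro r; rfl
  | cons h t iht =>
    intro r
    rw [List.map_cons, PySem.Dict.get?_mk_cons, PySem.Dict.get?_mk_cons]
    by_cases he : h.1 = r
    · simp [he]
    · rw [if_neg (by simp [neg_inj]; exact he), if_neg (by simp; exact he)]
      exact iht r

lemma pvNegD_get? (d : PySem.Dict Int Int) (r : Int) :
    (pvNegD d).get? (-r) = d.get? r := by
  rcases d with ⟨l⟩
  exact pvNegD_get?_aux l r

lemma pvNegD_insert (d : PySem.Dict Int Int) (k v : Int) :
    pvNegD (d.insert k v) = (pvNegD d).insert (-k) v := by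
  apply PySem.Dict.ext
  have hc := pvNegD_contains d k
  rw [show (pvNegD (d.insert k v)).items = (d.insert k v).items.map fun kv => (-kv.1, kv.2) from rfl]
  rw [PySem.Dict.items_insert, PySem.Dict.items_insert, hc]
  by_cases h : d.contains k = true
  · rw [if_pos h, if_pos h]
    rw [show (pvNegD d).items = d.items.map fun kv => (-kv.1, kv.2) from rfl]
    rw [List.map_map, List.map_map]
    apply List.map_congr_left
    intro p _
    by_cases he : p.1 = k
    · simp [he]
    · simp only [Function.comp]
      rw [if_neg (by simp; exact he), if_neg (by simp [neg_inj]; exact he)]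
  · rw [if_neg h, if_neg h]
    simp [pvNegD]

lemma pvALoop_neg (den : Int) (fuel : Nat) :
    ∀ (r : Int) (seen : PySem.Dict Int Int) (digits : List Int),
    pvALoop den fuel r seen digits = pvALoop (-den) fuel (-r) (pvNegD seen) digits := by
  induction fuel with
  | zero => intro r seen digits; rfl
  | succ f ih =>
    intro r seen digits
    by_cases hr : r = 0
    · rw [pvALoop, pvALoop, if_pos hr, if_pos (by rw [hr]; ring)]
    · have hr' : ¬(-r = 0) := by simpa using hr
      rw [pvALoop, pvALoop, if_neg hr, if_neg hr', pvNegD_contains, pvNegD_get?]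
      by_cases hc : seen.contains r = true
      · rw [hc]; rfl
      · rw [Bool.not_eq_true] at hc
        rw [hc]
        simp only [Bool.false_eq_true, if_false]
        have hmod : PySem.Int.mod (-r * 10) (-den) = -(PySem.Int.mod (r * 10) den) := by
          rw [show (-r * 10) = -(r * 10) by ring, PySem.Int.mod_neg_neg]
        have hdiv : PySem.Int.floordiv (-r * 10) (-den) = PySem.Int.floordiv (r * 10) den := by
          rw [show (-r * 10) = -(r * 10) by ring, PySem.Int.floordiv_neg_neg]
        rw [ih, hmod, hdiv, pvNegD_insert]

-- ---------- B's helpers, characterised ----------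

lemma pvGcd_eq (y : Nat) : ∀ x, pvGcd x y = Nat.gcd y x := by
  induction y using Nat.strong_induction_on with
  | _ y ih =>
    intro x
    rw [pvGcd]
    by_cases h : y = 0
    · simp [h]
    · rw [dif_neg h, ih (x % y) (Nat.mod_lt x (Nat.pos_of_ne_zero h)), ← Nat.gcd_rec]

lemma pvStrip_spec (P : Nat) (hP : 2 ≤ P) :
    ∀ t fuel acc, 0 < t → t ≤ fuel →
    ∃ e u, pvStrip P fuel t acc = (acc + e, u) ∧ t = P ^ e * u ∧ ¬ P ∣ u := by
  intro t
  induction t using Nat.strong_induction_on with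
  | _ t iht =>
    intro fuel acc ht hfuel
    match fuel with
    | 0 => omega
    | f+1 =>
      rw [pvStrip]
      by_cases hd : t % P = 0
      · rw [if_pos hd]
        have hdvd : P ∣ t := Nat.dvd_of_mod_eq_zero hd
        have htP : 0 < t / P := Nat.div_pos (Nat.le_of_dvd ht hdvd) (by omega)
        have hlt : t / P < t := Nat.div_lt_self ht (by omega)
        obtain ⟨e, u, heq, hfac, hnd⟩ := iht (t / P) hlt f (acc + 1) htP (by omega)
        refine ⟨e + 1, u, by rw [heq]; congr 1; omega, ?_, hnd⟩
        rw [pow_succ]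
        calc t = P * (t / P) := (Nat.mul_div_cancel' hdvd).symm
          _ = P * (P ^ e * u) := by rw [← hfac]
          _ = P ^ e * P * u := by ring
      · rw [if_neg hd]
        exact ⟨0, t, by simp, by simp, fun hdvd => hd (Nat.mod_eq_zero_of_dvd hdvd)⟩

lemma pvOrder_spec (m : Nat) (ord : Nat)
    (hpe : 10 ^ ord % m = 1) (hmin : ∀ q, 0 < q → q < ord → 10 ^ q % m ≠ 1) :
    ∀ fuel j, 0 < j → j ≤ ord → ord - j ≤ fuel →
    pvOrder m fuel (10 ^ j % m) j = ord := by
  intro fuel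
  induction fuel with
  | zero =>
    intro j hj hjo hf
    have hje : j = ord := by omega
    rw [pvOrder]
    exact hje
  | succ f ih =>
    intro j hj hjo hf
    rw [pvOrder]
    by_cases hu : 10 ^ j % m = 1
    · rw [if_pos hu]
      by_contra hne
      exact hmin j hj (by omega) hu
    · rw [if_neg hu]
      have hjlt : j < ord := by
        rcases eq_or_lt_of_le hjo with rfl | h
        · exact absurd hpe hu
        · exact h
      have hstep : 10 ^ j % m * 10 % m = 10 ^ (j+1) % m := by
        rw [Nat.mod_mul_mod, ← pow_succ]
      rw [hstep]
      exact ih (j+1) (by omega) hjlt (by omega)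

lemma pvFold_spec (rr dd : Nat) (hlt : rr < dd) : ∀ count,
    ((List.range count).foldl (fun (st : List Nat × Nat) _ =>
        (st.1 ++ [st.2 * 10 / dd], st.2 * 10 % dd)) ([], rr))
      = ((List.range count).map (pvDg rr dd), pvR rr dd count) := by
  intro count
  induction count with
  | zero => simp [pvR, Nat.mod_eq_of_lt hlt]
  | succ n ih =>
    rw [List.range_succ, List.foldl_append, List.map_append, ih]
    simp [pvDg, pvR_succ]

-- ---------- reduction of B's port to its Nat core ----------

def pvAltN (rr dd : Nat) : String :=
  if rr = 0 then "0."
  else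
    let g := pvGcd rr dd
    let t0 := dd / g
    let st2 := pvStrip 2 t0 t0 0
    let st5 := pvStrip 5 st2.2 st2.2 0
    let m := st5.2
    let s := if st5.1 ≤ st2.1 then st2.1 else st5.1
    let count := if m = 1 then s else s + pvOrder m m (10 % m) 1
    let digits := ((List.range count).foldl (fun (st : List Nat × Nat) _ =>
        (st.1 ++ [st.2 * 10 / dd], st.2 * 10 % dd)) ([], rr)).1
    let head := pvDigitsStrN (digits.take s)
    if m = 1 then "0." ++ head
    else "0." ++ head ++ "(" ++ pvDigitsStrN (digits.drop s) ++ ")"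

lemma pv_alt_reduce (n den : Int) :
    find_repeating_decimal_alt n den = pvAltN (PySem.Int.mod n den).natAbs den.natAbs := by
  rw [find_repeating_decimal_alt, pvAltN]
  by_cases h : PySem.Int.mod n den = 0
  · rw [if_pos h, if_pos (by simp [h])]
  · rw [if_neg h]
    have hne : ¬((PySem.Int.mod n den).natAbs = 0) := by simpa using h
    conv_rhs => rw [if_neg hne]

-- ---------- the main positive-case characterisation ----------

lemma pv_main_pos (rr dd : Nat) (hdd : 0 < dd) (hlt : rr < dd) :
    pvALoop (dd : Int) (dd + 1) ((rr : Nat) : Int) PySem.Dict.empty []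
      = pvAltN rr dd := by
  by_cases hrr : rr = 0
  · subst hrr
    rw [pvAltN, if_pos rfl, pvALoop, if_pos (by norm_num)]
    have h1 : PySem.Str.join "" ([] : List String) = "" := rfl
    simp [pvDigitsStr, h1]
  · rw [pvAltN, if_neg hrr]
    simp only [pvGcd_eq]
    have hrrpos : 0 < rr := Nat.pos_of_ne_zero hrr
    have hGpos : 0 < Nat.gcd dd rr := Nat.gcd_pos_of_pos_right _ hrrpos
    have hGdvd_dd : Nat.gcd dd rr ∣ dd := Nat.gcd_dvd_left dd rr
    have hGdvd_rr : Nat.gcd dd rr ∣ rr := Nat.gcd_dvd_right dd rr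
    have hd'pos : 0 < dd / Nat.gcd dd rr := Nat.div_pos (Nat.le_of_dvd hdd hGdvd_dd) hGpos
    obtain ⟨a, t1, he2, hfac2, hnd2⟩ := pvStrip_spec 2 le_rfl (dd / Nat.gcd dd rr) (dd / Nat.gcd dd rr) 0 hd'pos le_rfl
    have ht1pos : 0 < t1 := Nat.pos_of_ne_zero (by rintro rfl; rw [Nat.mul_zero] at hfac2; omega)
    obtain ⟨b, m, he5, hfac5, hnd5⟩ := pvStrip_spec 5 (by norm_num) t1 t1 0 ht1pos le_rfl
    have hmpos : 0 < m := Nat.pos_of_ne_zero (by rintro rfl; rw [Nat.mul_zero] at hfac5; omega)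
    rw [Nat.zero_add] at he2 he5
    rw [he2, he5]
    simp only
    have hsmax : (if b ≤ a then a else b) = max a b := by
      rcases le_total a b with h | h <;> split_ifs <;> omega
    rw [hsmax]
    -- shared arithmetic context
    have hco : Nat.Coprime (rr / Nat.gcd dd rr) (dd / Nat.gcd dd rr) := by
      have hpos : 0 < Nat.gcd rr dd := by rw [Nat.gcd_comm rr dd]; exact hGpos
      have h := Nat.coprime_div_gcd_div_gcd (m := rr) (n := dd) hpos
      rwa [Nat.gcd_comm rr dd] at h
    have hrr_fac : rr = Nat.gcd dd rr * (rr / Nat.gcd dd rr) := (Nat.mul_div_cancel' hGdvd_rr).symm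
    have hdd_fac : dd = Nat.gcd dd rr * (dd / Nat.gcd dd rr) := (Nat.mul_div_cancel' hGdvd_dd).symm
    have hd'fac : dd / Nat.gcd dd rr = 2 ^ a * 5 ^ b * m := by rw [hfac2, hfac5]; ring
    have hnd2m : ¬ 2 ∣ m := fun h => hnd2 (hfac5 ▸ Dvd.dvd.mul_left h (5 ^ b))
    have hd'dvd : dd / Nat.gcd dd rr ∣ dd := Nat.div_dvd_of_dvd hGdvd_dd
    have hd'le : dd / Nat.gcd dd rr ≤ dd := Nat.le_of_dvd hdd hd'dvd
    have hR_g : ∀ k, pvR rr dd k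
        = Nat.gcd dd rr * pvR (rr / Nat.gcd dd rr) (dd / Nat.gcd dd rr) k := by
      intro k
      have h := pv_mulR (Nat.gcd dd rr) (rr / Nat.gcd dd rr) (dd / Nat.gcd dd rr) k
      rw [← hrr_fac, ← hdd_fac] at h
      exact h
    have hRzero_iff : ∀ k, pvR rr dd k = 0 ↔ (m = 1 ∧ max a b ≤ k) := by
      intro k
      rw [hR_g k, Nat.mul_eq_zero]
      have hg0 : ¬ (Nat.gcd dd rr = 0) := by omega
      rw [or_iff_right hg0]
      unfold pvR
      rw [← Nat.dvd_iff_mod_eq_zero]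
      constructor
      · intro h
        have h10 : dd / Nat.gcd dd rr ∣ 10 ^ k := (Nat.Coprime.dvd_of_dvd_mul_left (hco.symm)) h
        rw [hd'fac] at h10
        exact (pv_dvd_ten_pow a b m k hnd2m hnd5).mp h10
      · intro h
        have h10 : dd / Nat.gcd dd rr ∣ 10 ^ k := by
          rw [hd'fac]
          exact (pv_dvd_ten_pow a b m k hnd2m hnd5).mpr h
        exact h10.mul_left _
    have hReq_iff : ∀ i j, i < j →
        (pvR rr dd i = pvR rr dd j ↔ (max a b ≤ i ∧ m ∣ 10 ^ (j - i) - 1)) := by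
      intro i j hij
      rw [hR_g i, hR_g j, mul_right_inj' (by omega : Nat.gcd dd rr ≠ 0)]
      rw [pvR_eq_iff_dvd _ _ hco i j (le_of_lt hij), hd'fac]
      exact pv_dvd_split a b m i (j - i) hnd2m hnd5 (by omega)
    -- the maximal prefix bound
    have hq1 : 1 ≤ 2 ^ a * 5 ^ b := Nat.one_le_iff_ne_zero.mpr (by positivity)
    have hsab : max a b < 2 ^ a * 5 ^ b := by
      have h1 : max a b < 2 ^ max a b := Nat.lt_two_pow_self
      have h2 : 2 ^ max a b ≤ 2 ^ a * 5 ^ b := by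
        rcases le_total b a with h | h
        · rw [max_eq_left h]
          exact Nat.le_mul_of_pos_right _ (by positivity)
        · rw [max_eq_right h]
          calc 2 ^ b ≤ 5 ^ b := Nat.pow_le_pow_left (by norm_num) b
            _ ≤ 2 ^ a * 5 ^ b := Nat.le_mul_of_pos_left _ (by positivity)
      omega
    -- align A's initial state
    have hstart : pvALoop (dd : Int) (dd + 1) ((rr : Nat) : Int) PySem.Dict.empty []
        = pvALoop (dd : Int) (dd + 1) ((pvR rr dd 0 : Nat) : Int) (pvSeen rr dd 0) (pvDigs rr dd 0) := by
      rw [pvR_zero rr dd hlt]; rfl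
    by_cases hm1 : m = 1
    · -- terminating decimal
      rw [if_pos hm1, if_pos hm1]
      rw [pvFold_spec rr dd hlt]
      simp only
      rw [List.take_of_length_le (by simp)]
      have hzero : ∀ k, pvR rr dd k = 0 ↔ max a b ≤ k := by
        intro k; rw [hRzero_iff k]; simp [hm1]
      have hfresh : ∀ i j, i < j → j ≤ max a b → pvR rr dd i ≠ pvR rr dd j := by
        intro i j hij hj h
        have := ((hReq_iff i j hij).mp h).1
        omega
      have hsdd : max a b ≤ dd := by
        have : 2 ^ a * 5 ^ b * m ≤ dd := hd'fac ▸ hd'le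
        nlinarith
      rw [hstart, pvALoop_term rr dd (max a b) hzero hfresh (dd + 1) 0 (by omega) (by omega)]
      rw [pvDigs_eq, pvDigitsStr_cast]
    · -- repeating decimal
      have hm : 1 < m := by omega
      have hco10 : Nat.Coprime 10 m := pv_coprime10 m hnd2m hnd5
      have hφpos : 0 < Nat.totient m := Nat.totient_pos.mpr (by omega)
      have hφ : 10 ^ Nat.totient m % m = 1 := by
        have h := Nat.ModEq.pow_totient hco10
        unfold Nat.ModEq at h
        rwa [Nat.mod_eq_of_lt hm] at h
      have hex : ∃ q, 0 < q ∧ 10 ^ q % m = 1 := ⟨Nat.totient m, hφpos, hφ⟩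
      have hps := Nat.find_spec hex
      have hpmin : ∀ q, 0 < q → q < Nat.find hex → 10 ^ q % m ≠ 1 :=
        fun q hq hltq h => Nat.find_min hex hltq ⟨hq, h⟩
      have hple : Nat.find hex ≤ Nat.totient m := Nat.find_min' hex ⟨hφpos, hφ⟩
      have hplt : Nat.find hex < m := lt_of_le_of_lt hple (Nat.totient_lt m hm)
      have horder : pvOrder m m (10 % m) 1 = Nat.find hex := by
        have h1 : (10 % m) = 10 ^ 1 % m := by rw [pow_one]
        rw [h1]
        exact pvOrder_spec m (Nat.find hex) hps.2 hpmin m 1 one_pos hps.1 (by omega)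
      rw [if_neg hm1, if_neg hm1, horder]
      rw [pvFold_spec rr dd hlt]
      simp only
      have hnz : ∀ k, pvR rr dd k ≠ 0 := by
        intro k h
        exact hm1 ((hRzero_iff k).mp h).1
      have heq : ∀ i j, i < j → j ≤ max a b + Nat.find hex →
          (pvR rr dd i = pvR rr dd j ↔ (max a b ≤ i ∧ Nat.find hex ∣ j - i)) := by
        intro i j hij _
        rw [hReq_iff i j hij,
          pv_order_dvd m (Nat.find hex) hm hps.1 hps.2 hpmin (j - i)]
      have hsdd : max a b + Nat.find hex ≤ dd := by
        have hd : 2 ^ a * 5 ^ b * m ≤ dd := hd'fac ▸ hd'le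
        nlinarith
      rw [hstart, pvALoop_rep rr dd (max a b) (Nat.find hex) hps.1 hnz heq (dd + 1) 0 (by omega) (by omega)]
      rw [pvDigitsStr_take, pvDigitsStr_drop]

-- ===== VERDICT (by name: the statement is the Claim_ definition above) =====
theorem find_repeating_decimal_spec : Claim_equal_find_repeating_decimal := by
  intro n den _ hden
  unfold Pre_find_repeating_decimal at hden
  unfold Spec_find_repeating_decimal
  rw [pv_alt_reduce n den, find_repeating_decimal]
  rcases lt_or_gt_of_ne hden with hneg | hpos
  · have hb := PySem.Int.mod_neg_bounds (a := n) hneg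
    rw [pvALoop_neg den (den.natAbs + 1)]
    have hemp : pvNegD PySem.Dict.empty = PySem.Dict.empty := rfl
    rw [hemp]
    obtain ⟨rv, hrv1, hrv2⟩ : ∃ rv : Nat,
        -(PySem.Int.mod n den) = (rv : Int) ∧ (PySem.Int.mod n den).natAbs = rv :=
      ⟨(PySem.Int.mod n den).natAbs, by omega, rfl⟩
    obtain ⟨dv, hdv1, hdv2⟩ : ∃ dv : Nat, -den = (dv : Int) ∧ den.natAbs = dv :=
      ⟨den.natAbs, by omega, rfl⟩
    rw [hrv1, hrv2, hdv1, hdv2]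
    exact pv_main_pos rv dv (by omega) (by omega)
  · have hb1 := PySem.Int.mod_nonneg (a := n) hpos
    have hb2 := PySem.Int.mod_lt (a := n) hpos
    obtain ⟨rv, hrv1, hrv2⟩ : ∃ rv : Nat,
        PySem.Int.mod n den = (rv : Int) ∧ (PySem.Int.mod n den).natAbs = rv :=
      ⟨(PySem.Int.mod n den).natAbs, by omega, rfl⟩
    obtain ⟨dv, hdv1, hdv2⟩ : ∃ dv : Nat, den = (dv : Int) ∧ den.natAbs = dv :=
      ⟨den.natAbs, by omega, rfl⟩
    rw [hrv1, hdv1]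
    simp only [Int.natAbs_natCast]
    exact pv_main_pos rv dv (by omega) (by omega)
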